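-- pv_equiv track=rewrite | github.com/OnyX0000/coding_test | Python3/프로그래머스/0/181829. 이차원 배열 대각선 순회하기/이차원 배열 대각선 순회하기.py | solution
-- ===== SOURCE A (Python) =====
-- def solution(board, k):
--     total_sum = 0
--     rows = len(board)
--     cols = len(board[0])
--
--     for i in range(rows) :
--         for j in range(cols) :
--             if i + j <= k :
--                 total_sum += board[i][j]
--
--     return total_sum
-- ===== SOURCE B (Python) =====
-- def solution(board, k):
--     rows = len(board)
--     cols = len(board[0])
--     total = 0
--     top = min(k, rows + cols - 2)
--     for d in range(top + 1):
--         lo = d - cols + 1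
--         if lo < 0:
--             lo = 0
--         hi = min(d, rows - 1)
--         for i in range(lo, hi + 1):
--             total += board[i][d - i]
--     return total
-- ===== Notes on version B (the rewrite author's own statement) =====
-- stated objective: alternative
-- what changed: Traverses the board by anti-diagonals: for each diagonal index d from 0 to min(k, rows+cols-2) it sums board[i][d-i] over the valid i-range, instead of scanning row-major and testing i+j<=k on every cell; the per-cell condition test disappears because only qualifying diagonals are visited.
import Mathlib
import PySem

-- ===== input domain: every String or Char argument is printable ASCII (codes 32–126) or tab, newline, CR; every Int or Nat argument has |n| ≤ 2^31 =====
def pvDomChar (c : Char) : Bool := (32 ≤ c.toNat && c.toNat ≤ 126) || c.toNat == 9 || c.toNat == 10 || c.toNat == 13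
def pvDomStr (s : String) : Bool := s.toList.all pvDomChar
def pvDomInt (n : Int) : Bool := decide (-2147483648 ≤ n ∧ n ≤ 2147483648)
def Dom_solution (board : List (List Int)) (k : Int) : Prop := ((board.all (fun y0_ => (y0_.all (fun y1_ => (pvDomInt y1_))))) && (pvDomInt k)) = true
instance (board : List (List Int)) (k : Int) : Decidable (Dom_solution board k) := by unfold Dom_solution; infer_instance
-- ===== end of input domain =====

-- B traverses the board by anti-diagonals (d = i + j from 0 to min(k, rows+cols-2), summing
-- board[i][d-i] over the valid i-range) instead of A's row-major scan with a per-cell i+j<=k test.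

-- ===== PORT A =====
def solution (board : List (List Int)) (k : Int) : Int :=
  let rows := board.length
  let cols := (PySem.List.pyGetD board 0 []).length   -- board[0]: IndexError on [] is excluded by Pre_
  (PySem.List.pyRange 0 rows 1).foldl (fun total i =>
    (PySem.List.pyRange 0 cols 1).foldl (fun total j =>
      if i + j ≤ k then total + PySem.List.pyGetD (PySem.List.pyGetD board i []) j 0 else total) total) 0
  -- board[i][j]: out-of-range access (short row actually reached) is excluded by Pre_

-- ===== PORT B =====
def solution_alt (board : List (List Int)) (k : Int) : Int :=
  let rows : Int := board.length
  let cols : Int := (PySem.List.pyGetD board 0 []).length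
  let top := min k (rows + cols - 2)
  (PySem.List.pyRange 0 (top + 1) 1).foldl (fun total d =>
    let lo := d - cols + 1
    let lo := if lo < 0 then 0 else lo
    let hi := min d (rows - 1)
    (PySem.List.pyRange lo (hi + 1) 1).foldl (fun total i =>
      total + PySem.List.pyGetD (PySem.List.pyGetD board i []) (d - i) 0) total) 0

-- ===== PRECONDITION & SPEC =====
-- Pre_ excludes exactly the inputs where A raises: the empty board (board[0] IndexError) and
-- boards where some row i is shorter than board[0] AND its first missing column len(row) is
-- actually reached, i.e. i + len(row) <= k (IndexError on board[i][len(row)]).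
def Pre_solution (board : List (List Int)) (k : Int) : Prop :=
  board ≠ [] ∧ ∀ i : Fin board.length,
    (board.get i).length < (board.headD []).length →
      k < (i.1 : Int) + ((board.get i).length : Int)
instance (board : List (List Int)) (k : Int) : Decidable (Pre_solution board k) := by
  unfold Pre_solution; infer_instance

def pvWitness_solution : List (List Int) × Int := ([[1, 2], [3, 4]], 1)

def Spec_solution (board : List (List Int)) (k : Int) (out : Int) : Prop := out = solution_alt board k
instance (board : List (List Int)) (k : Int) (out : Int) : Decidable (Spec_solution board k out) := by unfold Spec_solution; infer_instance

-- ===== CLAIM (what is proved, stated in full; the proofs are below) =====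
def Claim_equal_solution : Prop := ∀ (board : List (List Int)) (k : Int), Dom_solution board k → Pre_solution board k → Spec_solution board k (solution board k)

-- ===== LEMMAS AND PROOFS =====

-- the value both programs add for cell (i, j) (defaults never reached under Pre_)
def pvCell (board : List (List Int)) (i j : ℕ) : Int := (board.getD i []).getD j 0

-- the set of cells with i + j ≤ k
def pvT (board : List (List Int)) (k : Int) : Finset (ℕ × ℕ) :=
  (Finset.range board.length ×ˢ Finset.range (PySem.List.pyGetD board 0 []).length).filter
    (fun p => (p.1 : Int) + (p.2 : Int) ≤ k)

-- B's loop bounds, ℕ versions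
def pvD (board : List (List Int)) (k : Int) : ℕ :=
  (min k ((board.length : Int) + ((PySem.List.pyGetD board 0 []).length : Int) - 2) + 1).toNat
def pvLo (cols d : ℕ) : ℕ := d + 1 - cols
def pvCnt (rows cols d : ℕ) : ℕ := min d (rows - 1) + 1 - pvLo cols d

-- a conditional-add foldl is the sum of the guarded values
lemma foldl_ite_add {α : Type} (l : List α) (c : α → Prop) [DecidablePred c] (g : α → Int)
    (t : Int) :
    l.foldl (fun t x => if c x then t + g x else t) t
      = t + (l.map (fun x => if c x then g x else 0)).sum := by
  induction l generalizing t with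
  | nil => simp
  | cons a l ih =>
    simp only [List.foldl_cons, List.map_cons, List.sum_cons]
    split <;> rw [ih] <;> ring

-- list sum over List.range IS the Finset.range sum
lemma sum_map_range {M : Type} [AddCommMonoid M] (n : ℕ) (f : ℕ → M) :
    ((List.range n).map f).sum = ∑ i ∈ Finset.range n, f i := rfl

-- A's inner loop over j, as a Finset sum
lemma innerA (board : List (List Int)) (k : Int) (i cols : ℕ) (t : Int) :
    (PySem.List.pyRange 0 (cols : Int) 1).foldl
      (fun t j => if (i : Int) + j ≤ k then t + PySem.List.pyGetD (PySem.List.pyGetD board (i : Int) []) j 0 else t) t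
    = t + ∑ j ∈ Finset.range cols, (if (i : Int) + (j : Int) ≤ k then pvCell board i j else 0) := by
  rw [PySem.List.pyRange_zero_nat, List.foldl_map,
    foldl_ite_add _ (fun j : ℕ => (i : Int) + (j : Int) ≤ k)
      (fun j : ℕ => PySem.List.pyGetD (PySem.List.pyGetD board (i : Int) []) (j : Int) 0)]
  simp only [PySem.List.pyGetD_natCast, sum_map_range, pvCell]

-- A = sum over the cell set
lemma solution_eq_sum (board : List (List Int)) (k : Int) :
    solution board k = ∑ p ∈ pvT board k, pvCell board p.1 p.2 := by
  unfold solution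
  simp only []
  rw [pvT, Finset.sum_filter,
    Finset.sum_product' (Finset.range board.length)
      (Finset.range (PySem.List.pyGetD board 0 []).length)
      (fun a b => if (a : Int) + (b : Int) ≤ k then pvCell board a b else 0)]
  rw [PySem.List.pyRange_zero_nat board.length, List.foldl_map]
  rw [PySem.List.foldl_congr_mem (List.range board.length) _
      (fun t i => t + ∑ j ∈ Finset.range (PySem.List.pyGetD board 0 []).length,
        (if (i : Int) + (j : Int) ≤ k then pvCell board i j else 0)) 0
      (fun t i _ => innerA board k i _ t)]
  rw [PySem.List.foldl_add, sum_map_range, zero_add]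

-- B's inner loop over i on diagonal d, as a Finset sum
lemma innerB (board : List (List Int)) (rows cols d : ℕ) (hrows : 1 ≤ rows) (t : Int) :
    (PySem.List.pyRange
        (if (d : Int) - (cols : Int) + 1 < 0 then 0 else (d : Int) - (cols : Int) + 1)
        (min (d : Int) ((rows : Int) - 1) + 1) 1).foldl
      (fun t i => t + PySem.List.pyGetD (PySem.List.pyGetD board i []) ((d : Int) - i) 0) t
    = t + ∑ s ∈ Finset.range (pvCnt rows cols d),
        pvCell board (pvLo cols d + s) (d - (pvLo cols d + s)) := by
  rw [PySem.List.pyRange_one, List.foldl_map, PySem.List.foldl_add]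
  congr 1
  have hlo : (if (d : Int) - (cols : Int) + 1 < 0 then 0 else (d : Int) - (cols : Int) + 1)
      = ((pvLo cols d : ℕ) : Int) := by
    unfold pvLo; split <;> omega
  rw [hlo]
  have hn : (min (d : Int) ((rows : Int) - 1) + 1 - ((pvLo cols d : ℕ) : Int)).toNat
      = pvCnt rows cols d := by
    unfold pvCnt pvLo; omega
  rw [hn, sum_map_range]
  refine Finset.sum_congr rfl (fun s hs => ?_)
  simp only [Finset.mem_range] at hs
  have h1 : ((pvLo cols d : ℕ) : Int) + (s : Int) = ((pvLo cols d + s : ℕ) : Int) := by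
    push_cast; ring
  rw [h1, PySem.List.pyGetD_natCast]
  have h2 : (d : Int) - ((pvLo cols d + s : ℕ) : Int) = ((d - (pvLo cols d + s) : ℕ) : Int) := by
    unfold pvCnt pvLo at hs; omega
  rw [h2, PySem.List.pyGetD_natCast]
  rfl

-- B = the same sum, via the reindexing (d, s) ↦ (i, j) = (lo d + s, d - (lo d + s))
lemma solution_alt_eq_sum (board : List (List Int)) (k : Int) (hne : board ≠ []) :
    solution_alt board k = ∑ p ∈ pvT board k, pvCell board p.1 p.2 := by
  have hrows : 1 ≤ board.length := by
    cases board with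
    | nil => exact absurd rfl hne
    | cons a l => simp
  unfold solution_alt
  simp only []
  rw [PySem.List.pyRange_zero, List.foldl_map]
  have hD : (min k ((board.length : Int) + ((PySem.List.pyGetD board 0 []).length : Int) - 2) + 1).toNat
      = pvD board k := rfl
  rw [hD]
  rw [PySem.List.foldl_congr_mem (List.range (pvD board k)) _
      (fun t d => t + ∑ s ∈ Finset.range (pvCnt board.length (PySem.List.pyGetD board 0 []).length d),
        pvCell board (pvLo (PySem.List.pyGetD board 0 []).length d + s)
          (d - (pvLo (PySem.List.pyGetD board 0 []).length d + s))) 0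
      (fun t d _ => innerB board board.length (PySem.List.pyGetD board 0 []).length d hrows t)]
  rw [PySem.List.foldl_add, sum_map_range, zero_add]
  rw [Finset.sum_sigma' (Finset.range (pvD board k))
      (fun d => Finset.range (pvCnt board.length (PySem.List.pyGetD board 0 []).length d))
      (fun d s => pvCell board (pvLo (PySem.List.pyGetD board 0 []).length d + s)
        (d - (pvLo (PySem.List.pyGetD board 0 []).length d + s)))]
  refine Finset.sum_nbij'
    (fun x => (pvLo (PySem.List.pyGetD board 0 []).length x.1 + x.2,
               x.1 - (pvLo (PySem.List.pyGetD board 0 []).length x.1 + x.2)))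
    (fun p => ⟨p.1 + p.2, p.1 - pvLo (PySem.List.pyGetD board 0 []).length (p.1 + p.2)⟩)
    ?_ ?_ ?_ ?_ ?_
  · rintro ⟨d, s⟩ hx
    simp only [Finset.mem_sigma, Finset.mem_range] at hx
    simp only [pvT, Finset.mem_filter, Finset.mem_product, Finset.mem_range]
    unfold pvD pvCnt pvLo at *
    refine ⟨⟨?_, ?_⟩, ?_⟩ <;> omega
  · rintro ⟨i, j⟩ hp
    simp only [pvT, Finset.mem_filter, Finset.mem_product, Finset.mem_range] at hp
    simp only [Finset.mem_sigma, Finset.mem_range]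
    unfold pvD pvCnt pvLo at *
    refine ⟨?_, ?_⟩ <;> omega
  · rintro ⟨d, s⟩ hx
    simp only [Finset.mem_sigma, Finset.mem_range] at hx
    simp only [Sigma.mk.injEq, heq_eq_eq]
    unfold pvCnt pvLo at *
    constructor <;> omega
  · rintro ⟨i, j⟩ hp
    simp only [pvT, Finset.mem_filter, Finset.mem_product, Finset.mem_range] at hp
    simp only [Prod.mk.injEq]
    unfold pvCnt pvLo at *
    constructor <;> omega
  · rintro ⟨d, s⟩ hx
    rfl

-- ===== VERDICT (by name: the statement is the Claim_ definition above) =====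
theorem solution_spec : Claim_equal_solution := by
  intro board k _ hpre
  unfold Spec_solution
  rw [solution_eq_sum, solution_alt_eq_sum board k hpre.1]
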